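-- pv_equiv track=rewrite | github.com/Raincleared-Song/mention_extractor | utils/fewnerd_eval.py | __get_class_span_dict__
-- ===== SOURCE A (Python) =====
-- def __get_class_span_dict__(label, is_string=False):
--     """
--     return a dictionary of each class label/tag corresponding to the entity positions in the sentence
--     {label:[(start_pos, end_pos), ...]}
--     """
--     class_span = {}
--     i = 0
--     if not is_string:
--         # having labels in [0, num_of_class]
--         while i < len(label):
--             if label[i] > 0:
--                 start = i
--                 current_label = label[i]
--                 i += 1
--                 while i < len(label) and label[i] == current_label:
--                     i += 1
--                 if current_label in class_span:
--                     class_span[current_label].append((start, i))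
--                 else:
--                     class_span[current_label] = [(start, i)]
--             else:
--                 assert label[i] == 0
--                 i += 1
--     else:
--         # having tags in string format ['O', 'O', 'person-xxx', ..]
--         while i < len(label):
--             if label[i] != 'O':
--                 start = i
--                 current_label = label[i]
--                 i += 1
--                 while i < len(label) and label[i] == current_label:
--                     i += 1
--                 if current_label in class_span:
--                     class_span[current_label].append((start, i))
--                 else:
--                     class_span[current_label] = [(start, i)]
--             else:
--                 i += 1
--     return class_span
-- ===== SOURCE B (Python) =====
-- def __get_class_span_dict__(label, is_string=False):
--     class_span = {}
--     cur = None  # (run_label, run_start) or None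
--
--     def flush(end):
--         if cur is not None:
--             l, st = cur
--             class_span.setdefault(l, []).append((st, end))
--
--     for i, x in enumerate(label):
--         background = (x == 'O') if is_string else not (x > 0)
--         if background:
--             flush(i)
--             cur = None
--             if not is_string:
--                 assert x == 0
--         elif cur is None or cur[0] != x:
--             flush(i)
--             cur = (x, i)
--     flush(len(label))
--     return class_span
-- ===== Notes on version B (the rewrite author's own statement) =====
-- stated objective: alternative
-- what changed: A's outer while-loop with an inner run-skipping while-loop is replaced by a single flat pass that keeps the current open run (label, start) as state and flushes it on label change, background element, or end of sequence.
import Mathlib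
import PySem

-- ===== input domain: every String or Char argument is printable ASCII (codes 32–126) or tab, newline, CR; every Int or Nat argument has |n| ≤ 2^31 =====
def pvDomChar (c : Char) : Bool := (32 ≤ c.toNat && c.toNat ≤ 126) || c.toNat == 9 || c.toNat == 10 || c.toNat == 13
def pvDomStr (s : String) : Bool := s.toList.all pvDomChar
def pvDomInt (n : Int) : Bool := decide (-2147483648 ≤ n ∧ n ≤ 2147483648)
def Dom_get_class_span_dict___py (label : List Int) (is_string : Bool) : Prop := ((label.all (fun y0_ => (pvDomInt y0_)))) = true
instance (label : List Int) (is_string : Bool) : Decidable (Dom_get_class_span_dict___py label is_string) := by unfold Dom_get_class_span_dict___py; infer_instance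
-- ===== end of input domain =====

-- B replaces A's nested while-loops (outer scan + inner run-skipping loop) by one flat pass
-- keeping the current open run as state, flushed on label change / background / end (objective: alternative).
-- On negative labels with is_string=False both Pythons raise AssertionError; Pre_ excludes exactly those inputs.


-- ===== PORT A =====
-- Python dict with per-key list append (insertion order): append span to the key's list in place,
-- or add the key at the end on first occurrence.
def addSpanA (d : List (Int × List (Int × Int))) (l : Int) (sp : Int × Int) :
    List (Int × List (Int × Int)) :=
  match d with
  | [] => [(l, [sp])]
  | (k, v) :: rest => if k = l then (k, v ++ [sp]) :: rest else (k, v) :: addSpanA rest l sp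

-- A's inner `while i < len(label) and label[i] == current_label: i += 1`, on the remaining suffix.
def skipA (cur : Int) (xs : List Int) (i : Int) : List Int × Int :=
  match xs with
  | [] => ([], i)
  | x :: rest => if x = cur then skipA cur rest (i + 1) else (x :: rest, i)

theorem skipA_length (cur : Int) (xs : List Int) (i : Int) :
    (skipA cur xs i).1.length ≤ xs.length := by
  induction xs generalizing i with
  | nil => simp [skipA]
  | cons x rest ih =>
      by_cases h : x = cur <;> simp [skipA, h]
      · exact le_trans (ih _) (Nat.le_succ _)

-- A's outer while loop. The two Python branches are identical except for the test:
-- `label[i] > 0` (int branch) vs `label[i] != 'O'`, which on Int input is always true.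
-- The failing `assert label[i] == 0` (negative int) is excluded by Pre_.
def loopA (is_string : Bool) (xs : List Int) (i : Int) (d : List (Int × List (Int × Int))) :
    List (Int × List (Int × Int)) :=
  match xs with
  | [] => d
  | x :: rest =>
    if (if is_string then true else decide (0 < x)) then
      loopA is_string (skipA x rest (i + 1)).1 (skipA x rest (i + 1)).2
        (addSpanA d x (i, (skipA x rest (i + 1)).2))
    else
      loopA is_string rest (i + 1) d
termination_by xs.length
decreasing_by
  · have := skipA_length x rest (i + 1); simp; omega
  · simp

def get_class_span_dict___py (label : List Int) (is_string : Bool) :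
    List (Int × List (Int × Int)) :=
  loopA is_string label 0 []

-- ===== PORT B =====
-- class_span.setdefault(l, []).append(sp)
def addSpanB (d : List (Int × List (Int × Int))) (l : Int) (sp : Int × Int) :
    List (Int × List (Int × Int)) :=
  match d with
  | [] => [(l, [sp])]
  | (k, v) :: rest => if k = l then (k, v ++ [sp]) :: rest else (k, v) :: addSpanB rest l sp

-- flush(end): record the open run, if any
def flushB (d : List (Int × List (Int × Int))) (cur : Option (Int × Int)) (e : Int) :
    List (Int × List (Int × Int)) :=
  match cur with
  | none => d
  | some (l, st) => addSpanB d l (st, e)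

-- B's single for-loop: state = (dict, open run, index); returns the state after the loop.
def loopB (is_string : Bool) (xs : List Int) (i : Int) (d : List (Int × List (Int × Int)))
    (cur : Option (Int × Int)) : List (Int × List (Int × Int)) × Option (Int × Int) × Int :=
  match xs with
  | [] => (d, cur, i)
  | x :: rest =>
    if (if is_string then false else decide (¬ 0 < x)) then
      loopB is_string rest (i + 1) (flushB d cur i) none
    else
      match cur with
      | none => loopB is_string rest (i + 1) d (some (x, i))
      | some (l, _) =>
          if l = x then loopB is_string rest (i + 1) d cur
          else loopB is_string rest (i + 1) (addSpanB d l ((cur.getD (0,0)).2, i)) (some (x, i))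

def get_class_span_dict___py_alt (label : List Int) (is_string : Bool) :
    List (Int × List (Int × Int)) :=
  let r := loopB is_string label 0 [] none
  flushB r.1 r.2.1 r.2.2

-- ===== PRECONDITION & SPEC =====
-- Pre_ excludes exactly the inputs on which Python A raises AssertionError (a negative
-- label in the integer branch); Python B's assert raises there too.
def Pre_get_class_span_dict___py (label : List Int) (is_string : Bool) : Prop :=
  is_string = true ∨ ∀ x ∈ label, 0 ≤ x
instance (label : List Int) (is_string : Bool) : Decidable (Pre_get_class_span_dict___py label is_string) := by unfold Pre_get_class_span_dict___py; infer_instance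

def pvWitness_get_class_span_dict___py : List Int × Bool := ([1, 1, 0, 2, 2, 1], false)

def Spec_get_class_span_dict___py (label : List Int) (is_string : Bool) (out : List (Int × List (Int × Int))) : Prop := out = get_class_span_dict___py_alt label is_string
instance (label : List Int) (is_string : Bool) (out : List (Int × List (Int × Int))) : Decidable (Spec_get_class_span_dict___py label is_string out) := by unfold Spec_get_class_span_dict___py; infer_instance

-- ===== CLAIM (what is proved, stated in full; the proofs are below) =====
def Claim_equal_get_class_span_dict___py : Prop := ∀ (label : List Int) (is_string : Bool), Dom_get_class_span_dict___py label is_string → Pre_get_class_span_dict___py label is_string → Spec_get_class_span_dict___py label is_string (get_class_span_dict___py label is_string)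

-- ===== LEMMAS AND PROOFS =====

theorem addSpan_eq (d : List (Int × List (Int × Int))) (l : Int) (sp : Int × Int) :
    addSpanA d l sp = addSpanB d l sp := by
  induction d with
  | nil => rfl
  | cons p rest ih =>
      obtain ⟨k, v⟩ := p
      by_cases h : k = l <;> simp [addSpanA, addSpanB, h, ih]

-- final result of B's loop followed by the end-of-sequence flush
def finB (is_string : Bool) (xs : List Int) (i : Int) (d : List (Int × List (Int × Int)))
    (cur : Option (Int × Int)) : List (Int × List (Int × Int)) :=
  flushB (loopB is_string xs i d cur).1 (loopB is_string xs i d cur).2.1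
    (loopB is_string xs i d cur).2.2

-- running B with an open run (l, st), l non-background, is the same as skipping the
-- equal-label prefix, closing the run there, and continuing with no open run.
theorem finB_open (b : Bool) (xs : List Int) :
    ∀ (i st : Int) (d : List (Int × List (Int × Int))) (l : Int),
      (b = true ∨ 0 < l) →
      finB b xs i d (some (l, st)) =
        finB b (skipA l xs i).1 (skipA l xs i).2 (addSpanB d l (st, (skipA l xs i).2)) none := by
  induction xs with
  | nil => intro i st d l _; simp [finB, loopB, skipA, flushB]
  | cons x rest ih =>
      intro i st d l hl
      by_cases hx : x = l
      · subst hx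
        have hbg : ¬ (b = false ∧ x ≤ 0) := by
          rcases hl with h | h
          · simp [h]
          · intro hc; omega
        have hg : (if b = true then false else decide (¬0 < x)) = false := by
          rcases hl with h | h
          · simp [h]
          · simp; omega
        have hih := ih (i + 1) st d x hl
        simp only [finB, loopB, skipA] at hih ⊢
        simp only [hg, Bool.false_eq_true, if_false]
        exact hih
      · have hskip : skipA l (x :: rest) i = (x :: rest, i) := by
          simp [skipA, hx]
        rw [hskip]
        have hne : ¬ l = x := fun h => hx h.symm
        by_cases hbg : b = false ∧ x ≤ 0
        · simp [finB, loopB, hbg, flushB]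
        · simp [finB, loopB, hbg, hne, flushB]

-- A's nested loops compute exactly B's flat pass started with no open run.
theorem main_eq (b : Bool) :
    ∀ (n : Nat) (xs : List Int), xs.length ≤ n →
      ∀ (i : Int) (d : List (Int × List (Int × Int))),
        loopA b xs i d = finB b xs i d none := by
  intro n
  induction n with
  | zero =>
      intro xs h i d
      have : xs = [] := List.eq_nil_of_length_eq_zero (Nat.le_zero.mp h)
      subst this; simp [loopA, finB, loopB, flushB]
  | succ n ih =>
      intro xs h i d
      match xs with
      | [] => simp [loopA, finB, loopB, flushB]
      | x :: rest =>
        simp only [List.length_cons, Nat.succ_le_succ_iff] at h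
        by_cases ht : (if b then true else decide (0 < x)) = true
        · have hnb : b = true ∨ 0 < x := by cases b <;> simp_all
          have hbg : ¬ (b = false ∧ x ≤ 0) := by
            rcases hnb with h' | h'
            · simp [h']
            · intro hc; omega
          rw [loopA, if_pos ht]
          have hlen : (skipA x rest (i + 1)).1.length ≤ n :=
            le_trans (skipA_length x rest (i + 1)) h
          rw [ih _ hlen]
          have hopen := finB_open b rest (i + 1) i d x hnb
          have hstep : finB b (x :: rest) i d none = finB b rest (i + 1) d (some (x, i)) := by
            simp [finB, loopB, hbg]
          rw [hstep, hopen, addSpan_eq]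
        · -- background element: both sides just advance
          have hb : b = false := by cases b <;> simp_all
          subst hb
          have hx0 : x ≤ 0 := by simpa using ht
          rw [loopA]
          simp only [Bool.false_eq_true, if_false, decide_eq_true_eq]
          rw [if_neg (by omega)]
          rw [ih rest h]
          simp [finB, loopB, hx0, flushB]

-- ===== VERDICT (by name: the statement is the Claim_ definition above) =====
theorem get_class_span_dict___py_spec : Claim_equal_get_class_span_dict___py := by
  intro label is_string _ _
  unfold Spec_get_class_span_dict___py get_class_span_dict___py get_class_span_dict___py_alt
  simpa [finB] using main_eq is_string label.length label le_rfl 0 []
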